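-- pv_equiv track=rewrite | github.com/ahmetfurkankavraz/HMM-based-Selectivity-Estimation | dblp-dataset/query/more-subset.py | canonicalize_string
-- ===== SOURCE A (Python) =====
-- def canonicalize_string(string):
--     prev_char = ''
--     canonicalized_string = ''
--     for char in string:
--         if char == '%' and '%' == prev_char:
--             continue
--         prev_char = char
--         canonicalized_string += char
--     canonicalized_string = canonicalized_string.strip('%')
--     canonicalized_string = f"%{canonicalized_string}%"
--     return canonicalized_string
-- ===== SOURCE B (Python) =====
-- def canonicalize_string(string):
--     parts = [p for p in string.split('%') if p]
--     return "%" + "%".join(parts) + "%"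
-- ===== Notes on version B (the rewrite author's own statement) =====
-- stated objective: simpler
-- what changed: Replaces A's prev_char-tracking character loop (collapse '%'-runs, then strip '%', then wrap) with a split on '%', drop the empty pieces, rejoin with '%' and wrap.
import Mathlib
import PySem

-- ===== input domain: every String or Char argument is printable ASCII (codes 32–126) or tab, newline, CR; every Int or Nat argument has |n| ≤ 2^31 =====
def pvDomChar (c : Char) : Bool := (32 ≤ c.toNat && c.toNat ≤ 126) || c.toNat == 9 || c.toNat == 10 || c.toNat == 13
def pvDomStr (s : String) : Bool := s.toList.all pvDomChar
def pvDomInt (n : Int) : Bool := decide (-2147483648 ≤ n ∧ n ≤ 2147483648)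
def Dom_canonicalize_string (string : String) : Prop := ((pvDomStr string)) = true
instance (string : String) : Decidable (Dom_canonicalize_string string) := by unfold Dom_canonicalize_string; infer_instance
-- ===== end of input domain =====

-- B collapses the '%'-runs by splitting on '%' and rejoining the nonempty pieces, instead of A's
-- prev_char-tracking character loop followed by strip; objective: simpler (same O(n) cost).

-- ===== PORT A =====
def canonicalize_string (string : String) : String :=
  let st := string.toList.foldl
    (fun (st : List Char × List Char) c =>
      if c = '%' ∧ st.1 = ['%'] then st else ([c], st.2 ++ [c]))
    ([], [])
  String.mk ('%' :: PySem.Chars.stripChars st.2 ['%'] ++ ['%'])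

-- ===== PORT B =====
def canonicalize_string_alt (string : String) : String :=
  let parts := (PySem.Chars.splitOn string.toList ['%']).filter (fun p => !p.isEmpty)
  String.mk ('%' :: PySem.Chars.join ['%'] parts ++ ['%'])

-- ===== PRECONDITION & SPEC =====
def Spec_canonicalize_string (string : String) (out : String) : Prop := out = canonicalize_string_alt string
instance (string : String) (out : String) : Decidable (Spec_canonicalize_string string out) := by unfold Spec_canonicalize_string; infer_instance

-- ===== CLAIM (what is proved, stated in full; the proofs are below) =====
def Claim_equal_canonicalize_string : Prop := ∀ (string : String), Dom_canonicalize_string string → Spec_canonicalize_string string (canonicalize_string string)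

-- ===== LEMMAS AND PROOFS =====

-- A's collapse loop, as a structural recursion on the remaining characters (prev kept as in A).
def pvCol (p : List Char) : List Char → List Char
  | [] => []
  | c :: r => if c = '%' ∧ p = ['%'] then pvCol p r else c :: pvCol [c] r

-- The fields of the string between '%' separators, as a direct recursion.
def pvFields : List Char → List (List Char)
  | [] => [[]]
  | c :: r => if c = '%' then [] :: pvFields r else (c :: (pvFields r).headI) :: (pvFields r).tail

def pvSegs (l : List Char) : List (List Char) := (pvFields l).filter (fun p => !p.isEmpty)

def pvJ (l : List Char) : List Char := PySem.Chars.join ['%'] (pvSegs l)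

def pvQ (c : Char) : Bool := List.contains ['%'] c

def pvRstrip (x : List Char) : List Char := (List.dropWhile pvQ x.reverse).reverse

lemma pvQ_eq (c : Char) : pvQ c = decide (c = '%') := by
  by_cases h : c = '%' <;> simp [pvQ, h]

lemma pvFields_ne_nil (l : List Char) : pvFields l ≠ [] := by
  cases l with
  | nil => simp [pvFields]
  | cons c r => by_cases h : c = '%' <;> simp [pvFields, h]

lemma foldl_col (l : List Char) (p acc : List Char) :
    (l.foldl (fun (st : List Char × List Char) c =>
      if c = '%' ∧ st.1 = ['%'] then st else ([c], st.2 ++ [c])) (p, acc)).2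
    = acc ++ pvCol p l := by
  induction l generalizing p acc with
  | nil => simp [pvCol]
  | cons c r ih =>
      by_cases h : c = '%' ∧ p = ['%']
      · simp [pvCol, h, ih]
      · simp [pvCol, h, ih]

lemma go_spec : ∀ (fuel : ℕ) (l : List Char), l.length < fuel →
    ∀ (cur : List Char) (acc : List (List Char)),
    PySem.Chars.splitOn.go ['%'] fuel l cur acc
    = acc.reverse ++ ((cur.reverse ++ (pvFields l).headI) :: (pvFields l).tail) := by
  intro fuel
  induction fuel with
  | zero => intro l h; omega
  | succ n ih =>
      intro l h cur acc
      cases l with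
      | nil => simp [PySem.Chars.splitOn.go, pvFields]
      | cons c rest =>
          by_cases hc : c = '%'
          · subst hc
            have hpre : List.isPrefixOf ['%'] ('%' :: rest) = true := by
              simp [List.isPrefixOf]
            simp only [PySem.Chars.splitOn.go, hpre, if_true, List.length_cons, List.drop_succ_cons,
              List.drop_zero, List.length_nil]
            rw [ih rest (by simpa using Nat.lt_of_succ_lt_succ h) [] (cur.reverse :: acc)]
            obtain ⟨f, t, hft⟩ : ∃ f t, pvFields rest = f :: t := by
              rcases hf : pvFields rest with _ | ⟨f, t⟩
              · exact absurd hf (pvFields_ne_nil rest)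
              · exact ⟨f, t, rfl⟩
            simp [pvFields, hft]
          · have hpre : List.isPrefixOf ['%'] (c :: rest) = false := by
              simp [List.isPrefixOf, BEq.beq]
              intro hcc
              exact absurd hcc.symm hc
            simp only [PySem.Chars.splitOn.go, hpre, if_false]
            rw [ih rest (by simpa using Nat.lt_of_succ_lt_succ h) (c :: cur) acc]
            simp [pvFields, hc]

lemma splitOn_eq_fields (l : List Char) :
    PySem.Chars.splitOn l ['%'] = pvFields l := by
  unfold PySem.Chars.splitOn
  rw [go_spec (l.length + 1) l (Nat.lt_succ_self _) [] []]
  obtain ⟨f, t, hft⟩ : ∃ f t, pvFields l = f :: t := by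
    rcases hf : pvFields l with _ | ⟨f, t⟩
    · exact absurd hf (pvFields_ne_nil l)
    · exact ⟨f, t, rfl⟩
  simp [hft]

-- A last non-'%' character as prev behaves like the empty prev.
lemma col_ne (c : Char) (hc : c ≠ '%') (l : List Char) : pvCol [c] l = pvCol [] l := by
  cases l with
  | nil => rfl
  | cons d r => simp [pvCol, hc]

-- pvCol over an all-non-'%' word passes it through (empty-prev version).
lemma col_word_nil (w : List Char) (hw : ∀ c ∈ w, c ≠ '%') (l : List Char) :
    pvCol [] (w ++ l) = w ++ pvCol [] l := by
  induction w with
  | nil => simp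
  | cons c w' ih =>
      have hc : c ≠ '%' := hw c (List.mem_cons_self ..)
      have hw' : ∀ d ∈ w', d ≠ '%' := fun d hd => hw d (List.mem_cons_of_mem _ hd)
      simp only [List.cons_append, pvCol, hc, false_and, if_false]
      rw [col_ne c hc, ih hw']

-- pvCol over a nonempty all-non-'%' word passes it through, for any prev.
lemma col_word (w : List Char) (hw : ∀ c ∈ w, c ≠ '%') (hne : w ≠ []) (p l : List Char) :
    pvCol p (w ++ l) = w ++ pvCol [] l := by
  cases w with
  | nil => exact absurd rfl hne
  | cons c w' =>
      have hc : c ≠ '%' := hw c (List.mem_cons_self ..)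
      have hw' : ∀ d ∈ w', d ≠ '%' := fun d hd => hw d (List.mem_cons_of_mem _ hd)
      simp only [List.cons_append, pvCol, hc, false_and, if_false]
      rw [col_ne c hc, col_word_nil w' hw']

-- pvCol ['%'] never starts with '%'.
lemma col_pct_head (l : List Char) :
    pvCol ['%'] l = [] ∨ ∃ c r, pvCol ['%'] l = c :: r ∧ c ≠ '%' := by
  induction l with
  | nil => left; rfl
  | cons c r ih =>
      by_cases hc : c = '%'
      · subst hc; simpa [pvCol] using ih
      · right; exact ⟨c, pvCol [c] r, by simp [pvCol, hc], hc⟩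

-- stripChars is left-strip then pvRstrip.
lemma stripChars_eq (x : List Char) :
    PySem.Chars.stripChars x ['%'] = pvRstrip (List.dropWhile pvQ x) := rfl

lemma dropWhile_pvQ_noop (x : List Char)
    (hx : x = [] ∨ ∃ c r, x = c :: r ∧ c ≠ '%') : List.dropWhile pvQ x = x := by
  rcases hx with h | ⟨c, r, h, hc⟩
  · simp [h]
  · subst h; simp [List.dropWhile_cons, pvQ_eq, hc]

lemma strip_cons_pct (x : List Char) :
    PySem.Chars.stripChars ('%' :: x) ['%'] = PySem.Chars.stripChars x ['%'] := by
  have h : List.dropWhile pvQ ('%' :: x) = List.dropWhile pvQ x := by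
    simp [List.dropWhile_cons, pvQ_eq]
  rw [stripChars_eq, stripChars_eq, h]

lemma dropWhile_pvQ_nonpct (w : List Char) (hw : ∀ c ∈ w, c ≠ '%') :
    List.dropWhile pvQ w = w := by
  cases w with
  | nil => rfl
  | cons c r => simp [List.dropWhile_cons, pvQ_eq, hw c (List.mem_cons_self ..)]

lemma rstrip_append (w X : List Char) (hw : ∀ c ∈ w, c ≠ '%') :
    pvRstrip (w ++ X) = w ++ pvRstrip X := by
  unfold pvRstrip
  rw [List.reverse_append, List.dropWhile_append]
  by_cases h : (List.dropWhile pvQ X.reverse).isEmpty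
  · rw [if_pos h]
    rw [dropWhile_pvQ_nonpct w.reverse (fun c hc => hw c (List.mem_reverse.mp hc))]
    simp only [List.isEmpty_iff] at h
    simp [h]
  · rw [if_neg h]
    simp

lemma rstrip_pct_cons (Y : List Char) :
    pvRstrip ('%' :: Y) = if pvRstrip Y = [] then [] else '%' :: pvRstrip Y := by
  unfold pvRstrip
  rw [List.reverse_cons, List.dropWhile_append]
  by_cases h : (List.dropWhile pvQ Y.reverse).isEmpty
  · rw [if_pos h]
    simp only [List.isEmpty_iff] at h
    simp [h, List.dropWhile_cons, pvQ_eq]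
  · rw [if_neg h]
    simp only [List.isEmpty_iff] at h
    simp [h]

lemma fields_word (w : List Char) (hw : ∀ c ∈ w, c ≠ '%') (l : List Char) :
    pvFields (w ++ l) = (w ++ (pvFields l).headI) :: (pvFields l).tail := by
  induction w with
  | nil =>
      simp only [List.nil_append]
      rcases hf : pvFields l with _ | ⟨f, t⟩
      · exact absurd hf (pvFields_ne_nil l)
      · simp
  | cons c w' ih =>
      have hc : c ≠ '%' := hw c (List.mem_cons_self ..)
      have hw' : ∀ d ∈ w', d ≠ '%' := fun d hd => hw d (List.mem_cons_of_mem _ hd)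
      simp [pvFields, hc, ih hw']

lemma segs_pct_cons (r : List Char) : pvSegs ('%' :: r) = pvSegs r := by
  simp [pvSegs, pvFields]

lemma segs_word_pct (w : List Char) (hw : ∀ c ∈ w, c ≠ '%') (hne : w ≠ []) (r : List Char) :
    pvSegs (w ++ '%' :: r) = w :: pvSegs r := by
  unfold pvSegs
  rw [fields_word w hw ('%' :: r)]
  simp [pvFields, List.filter_cons, hne]

lemma segs_word (w : List Char) (hw : ∀ c ∈ w, c ≠ '%') (hne : w ≠ []) :
    pvSegs w = [w] := by
  unfold pvSegs
  have h := fields_word w hw []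
  simp only [pvFields, List.headI, List.tail, List.append_nil] at h
  rw [h]
  simp [List.filter_cons, hne]

lemma pvJ_eq_nil_iff (r : List Char) : pvJ r = [] ↔ pvSegs r = [] := by
  constructor
  · intro h
    rcases hs : pvSegs r with _ | ⟨f, t⟩
    · rfl
    · exfalso
      have hf : f ≠ [] := by
        have : f ∈ pvSegs r := by rw [hs]; exact List.mem_cons_self ..
        have := List.of_mem_filter this
        simpa [List.isEmpty_iff] using this
      rw [pvJ, hs] at h
      cases t with
      | nil => rw [PySem.Chars.join_singleton] at h; exact hf h
      | cons g t' =>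
          rw [PySem.Chars.join_cons_cons] at h
          simp [hf] at h
  · intro h; simp [pvJ, h, PySem.Chars.join_nil]

lemma dropWhile_head_not (q : Char → Bool) :
    ∀ (r : List Char) (d : Char) (r'' : List Char), List.dropWhile q r = d :: r'' → q d = false := by
  intro r
  induction r with
  | nil => intro d r'' h; simp at h
  | cons a r ih =>
      intro d r'' h
      by_cases ha : q a
      · rw [List.dropWhile_cons, if_pos ha] at h; exact ih d r'' h
      · rw [List.dropWhile_cons, if_neg ha] at h
        cases h; simpa using ha

theorem main_strip (n : ℕ) : ∀ l : List Char, l.length ≤ n →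
    PySem.Chars.stripChars (pvCol [] l) ['%'] = pvJ l ∧
    PySem.Chars.stripChars (pvCol ['%'] l) ['%'] = pvJ l := by
  induction n with
  | zero =>
      intro l hl
      have : l = [] := List.eq_nil_of_length_eq_zero (Nat.le_zero.mp hl)
      subst this
      constructor <;> simp [pvCol, pvJ, pvSegs, pvFields, PySem.Chars.stripChars,
        PySem.Chars.join_nil]
  | succ n ih =>
      intro l hl
      cases l with
      | nil =>
          constructor <;> simp [pvCol, pvJ, pvSegs, pvFields, PySem.Chars.stripChars,
            PySem.Chars.join_nil]
      | cons c r =>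
          have hr : r.length ≤ n := Nat.lt_succ_iff.mp (by simpa using hl)
          by_cases hc : c = '%'
          · subst hc
            have hJ : pvJ ('%' :: r) = pvJ r := by rw [pvJ, pvJ, segs_pct_cons]
            constructor
            · have h1 : pvCol [] ('%' :: r) = '%' :: pvCol ['%'] r := by simp [pvCol]
              rw [h1, strip_cons_pct, hJ]
              exact (ih r hr).2
            · have h1 : pvCol ['%'] ('%' :: r) = pvCol ['%'] r := by simp [pvCol]
              rw [h1, hJ]
              exact (ih r hr).2
          · -- decompose l = w ++ l' with w the maximal non-'%' word
            set tw := r.takeWhile (fun d => d != '%') with htw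
            set l' := r.dropWhile (fun d => d != '%') with hl'
            have hsplit : r = tw ++ l' := (List.takeWhile_append_dropWhile).symm
            have hwmem : ∀ d ∈ c :: tw, d ≠ '%' := by
              intro d hd
              rcases List.mem_cons.mp hd with h | h
              · subst h; exact hc
              · have := List.mem_takeWhile_imp h
                simpa using this
            have hwne : (c :: tw) ≠ [] := by simp
            have hcl : c :: r = (c :: tw) ++ l' := by rw [hsplit]; rfl
            have main_eq : ∀ p : List Char,
                pvCol p ((c :: tw) ++ l') = (c :: tw) ++ pvCol [] l' :=
              fun p => col_word (c :: tw) hwmem hwne p l'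
            cases hl'c : l' with
            | nil =>
                have hw : c :: r = (c :: tw) := by rw [hcl, hl'c, List.append_nil]
                have strip_w : PySem.Chars.stripChars (c :: tw) ['%'] = c :: tw := by
                  rw [stripChars_eq, dropWhile_pvQ_nonpct _ hwmem]
                  have := rstrip_append (c :: tw) [] hwmem
                  simpa [pvRstrip] using this
                have colv : ∀ p : List Char, pvCol p (c :: r) = c :: tw := by
                  intro p
                  rw [hcl, hl'c]
                  have := main_eq p
                  rw [hl'c] at this
                  simpa [pvCol] using this
                have hJw : pvJ (c :: r) = c :: tw := by
                  rw [hw, pvJ, segs_word _ hwmem hwne, PySem.Chars.join_singleton]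
                exact ⟨by rw [colv [], strip_w, hJw], by rw [colv ['%'], strip_w, hJw]⟩
            | cons d r'' =>
                have hd : d = '%' := by
                  have := dropWhile_head_not (fun d => d != '%') r d r'' (by rw [← hl', hl'c])
                  simpa using this
                subst hd
                have hr'' : r''.length ≤ n := by
                  have : r.length = tw.length + (r'').length + 1 := by
                    rw [hsplit, hl'c]; simp; omega
                  omega
                have ihY := (ih r'' hr'').2
                -- the collapsed tail and its strip
                have colY : ∀ p : List Char,
                    pvCol p (c :: r) = (c :: tw) ++ '%' :: pvCol ['%'] r'' := by
                  intro p
                  rw [hcl, main_eq p, hl'c]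
                  simp [pvCol]
                have stripY : pvRstrip (pvCol ['%'] r'') = pvJ r'' := by
                  rw [← ihY, stripChars_eq, dropWhile_pvQ_noop _ (col_pct_head r'')]
                have strip_all : ∀ p : List Char,
                    PySem.Chars.stripChars (pvCol p (c :: r)) ['%']
                    = (c :: tw) ++ (if pvJ r'' = [] then [] else '%' :: pvJ r'') := by
                  intro p
                  rw [colY p, stripChars_eq,
                    dropWhile_pvQ_noop _ (Or.inr ⟨c, tw ++ '%' :: pvCol ['%'] r'', by simp, hc⟩),
                    rstrip_append _ _ hwmem, rstrip_pct_cons, stripY]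
                have hJr : pvJ (c :: r)
                    = (c :: tw) ++ (if pvJ r'' = [] then [] else '%' :: pvJ r'') := by
                  rw [hcl, hl'c, pvJ, segs_word_pct _ hwmem hwne]
                  by_cases hz : pvSegs r'' = []
                  · rw [hz, PySem.Chars.join_singleton]
                    rw [if_pos ((pvJ_eq_nil_iff r'').mpr hz), List.append_nil]
                  · rcases hs : pvSegs r'' with _ | ⟨f, t⟩
                    · exact absurd hs hz
                    · rw [PySem.Chars.join_cons_cons]
                      have : pvJ r'' ≠ [] := fun h => hz ((pvJ_eq_nil_iff r'').mp h)
                      rw [if_neg this, pvJ, hs]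
                      simp
                exact ⟨by rw [strip_all [], hJr], by rw [strip_all ['%'], hJr]⟩

-- ===== VERDICT (by name: the statement is the Claim_ definition above) =====
theorem canonicalize_string_spec : Claim_equal_canonicalize_string := by
  intro s _
  unfold Spec_canonicalize_string canonicalize_string canonicalize_string_alt
  show String.mk ('%' :: PySem.Chars.stripChars
      (s.toList.foldl (fun (st : List Char × List Char) c =>
        if c = '%' ∧ st.1 = ['%'] then st else ([c], st.2 ++ [c])) ([], [])).2 ['%'] ++ ['%'])
    = String.mk ('%' :: PySem.Chars.join ['%']
        ((PySem.Chars.splitOn s.toList ['%']).filter (fun p => !p.isEmpty)) ++ ['%'])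
  rw [foldl_col s.toList [] [], List.nil_append, splitOn_eq_fields,
    (main_strip s.toList.length s.toList le_rfl).1, pvJ, pvSegs]
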